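-- pv_equiv track=rewrite | github.com/thiagofaa23-a11y/EP2-DesSoft-Thiago | funcoes.py | calcula_pontos_sequencia_alta
-- ===== SOURCE A (Python) =====
-- def calcula_pontos_sequencia_alta(dados):
--     presenca = [0] * 7
--
--
--     for dado in dados:
--         presenca[dado] = 1
--
--     sequencia = 0
--
--     for i in range(1, 7):
--
--         if presenca[i] == 1:
--             sequencia += 1
--
--             if sequencia == 5:
--                 return 30
--
--         else:
--             sequencia = 0
--
--     return 0
-- ===== SOURCE B (Python) =====
-- def calcula_pontos_sequencia_alta(dados):
--     presenca = [0] * 7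
--     for dado in dados:
--         presenca[dado] = 1
--     if all(presenca[i] for i in (1, 2, 3, 4, 5)) or all(presenca[i] for i in (2, 3, 4, 5, 6)):
--         return 30
--     return 0
-- ===== Notes on version B (the rewrite author's own statement) =====
-- stated objective: simpler
-- what changed: Keeps the presence-table build but replaces the incremental run-counter scan over range(1,7) by two fixed five-slot window tests (all of presenca[1..5] or all of presenca[2..6]).
import Mathlib
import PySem

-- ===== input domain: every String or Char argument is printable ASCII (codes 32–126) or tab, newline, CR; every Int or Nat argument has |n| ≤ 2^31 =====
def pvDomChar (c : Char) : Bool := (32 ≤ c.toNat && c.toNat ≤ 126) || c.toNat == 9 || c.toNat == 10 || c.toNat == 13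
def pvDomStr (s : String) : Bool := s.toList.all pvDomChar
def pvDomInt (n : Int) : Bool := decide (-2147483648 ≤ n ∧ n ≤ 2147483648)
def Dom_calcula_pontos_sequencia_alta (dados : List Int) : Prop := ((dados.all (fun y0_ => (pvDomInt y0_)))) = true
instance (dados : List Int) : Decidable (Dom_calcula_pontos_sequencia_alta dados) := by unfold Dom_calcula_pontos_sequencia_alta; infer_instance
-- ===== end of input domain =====

-- B keeps the presence-table build but replaces the incremental run-counter scan by two
-- fixed five-slot window tests over the table (objective: simpler).

-- ===== PORT A =====
def calcula_pontos_sequencia_alta (dados : List Int) : Int :=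
  let presenca : List Int := List.replicate 7 0
  let presenca := dados.foldl (fun p dado => PySem.List.pySetD p dado 1) presenca
  let r := (PySem.List.pyRange 1 7 1).foldl
    (fun (st : Option Int × Int) i =>
      match st with
      | (some r, s) => (some r, s)
      | (none, sequencia) =>
        if PySem.List.pyGetD presenca i 0 = 1 then
          let sequencia := sequencia + 1
          if sequencia = 5 then (some 30, sequencia) else (none, sequencia)
        else (none, 0))
    (none, 0)
  r.1.getD 0

-- ===== PORT B =====
def calcula_pontos_sequencia_alta_alt (dados : List Int) : Int :=
  let presenca : List Int := List.replicate 7 0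
  let presenca := dados.foldl (fun p dado => PySem.List.pySetD p dado 1) presenca
  if ([1, 2, 3, 4, 5] : List Int).all (fun i => PySem.List.pyGetD presenca i 0 != 0) ||
      ([2, 3, 4, 5, 6] : List Int).all (fun i => PySem.List.pyGetD presenca i 0 != 0) then 30
  else 0

-- ===== PRECONDITION & SPEC =====
-- Pre_ excludes exactly the inputs where A raises IndexError: a die outside -7..6.
def Pre_calcula_pontos_sequencia_alta (dados : List Int) : Prop :=
  ∀ d ∈ dados, -7 ≤ d ∧ d < 7
instance (dados : List Int) : Decidable (Pre_calcula_pontos_sequencia_alta dados) := by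
  unfold Pre_calcula_pontos_sequencia_alta; infer_instance
def pvWitness_calcula_pontos_sequencia_alta : List Int := [2, 3, 4, 5, 6, -1]

def Spec_calcula_pontos_sequencia_alta (dados : List Int) (out : Int) : Prop := out = calcula_pontos_sequencia_alta_alt dados
instance (dados : List Int) (out : Int) : Decidable (Spec_calcula_pontos_sequencia_alta dados out) := by unfold Spec_calcula_pontos_sequencia_alta; infer_instance

-- ===== CLAIM (what is proved, stated in full; the proofs are below) =====
def Claim_equal_calcula_pontos_sequencia_alta : Prop := ∀ (dados : List Int), Dom_calcula_pontos_sequencia_alta dados → Pre_calcula_pontos_sequencia_alta dados → Spec_calcula_pontos_sequencia_alta dados (calcula_pontos_sequencia_alta dados)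

-- ===== LEMMAS AND PROOFS =====

-- one pySetD step on a length-7 list with an in-range (possibly negative) index is .set at d % 7
lemma pySetD_mod7 (p : List Int) (hp : p.length = 7) (d : Int) (h1 : -7 ≤ d) (h2 : d < 7) :
    PySem.List.pySetD p d 1 = p.set (d % 7).toNat 1 := by
  unfold PySem.List.pySetD PySem.List.pySet? PySem.List.pyIdx?
  rw [hp]
  split_ifs with h0 hlt hge
  · simp only [Option.map_some, Option.getD_some]; congr 1; omega
  · exfalso; push_cast at hlt; omega
  · simp only [Option.map_some, Option.getD_some]; congr 1
    push_cast at hge ⊢; omega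
  · exfalso; push_cast at hge; omega

-- the built presence list read at n < 7 is 1 exactly when some die maps to n under % 7
lemma build_getD (dados : List Int) (p : List Int) (hp : p.length = 7)
    (hd : ∀ d ∈ dados, -7 ≤ d ∧ d < 7) (n : Nat) (hn : n < 7) :
    (dados.foldl (fun q d => PySem.List.pySetD q d 1) p).getD n 0 =
      if ∃ d ∈ dados, d % 7 = (n : Int) then 1 else p.getD n 0 := by
  induction dados generalizing p with
  | nil => simp
  | cons d rest ih =>
    have hd0 := hd d (by simp)
    have hrest : ∀ x ∈ rest, -7 ≤ x ∧ x < 7 := fun x hx => hd x (by simp [hx])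
    rw [List.foldl_cons, pySetD_mod7 p hp d hd0.1 hd0.2,
        ih _ (by simp [hp]) hrest]
    by_cases hR : ∃ x ∈ rest, x % 7 = (n : Int)
    · rw [if_pos hR, if_pos (by rcases hR with ⟨x, hx, he⟩; exact ⟨x, by simp [hx], he⟩)]
    · rw [if_neg hR]
      by_cases hD : d % 7 = (n : Int)
      · rw [if_pos ⟨d, by simp, hD⟩]
        have hkn : (d % 7).toNat = n := by omega
        simp [List.getD, hkn, hp, hn]
      · rw [if_neg (by rintro ⟨x, hx, he⟩
                       rcases List.mem_cons.mp hx with h | h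
                       · exact hD (h ▸ he)
                       · exact hR ⟨x, h, he⟩)]
        have hkn : (d % 7).toNat ≠ n := by omega
        simp [List.getD, hkn]

-- the presence list of A's port, read at a literal index n < 7
lemma hgetL (dados : List Int) (hpre : ∀ d ∈ dados, -7 ≤ d ∧ d < 7) (n : Nat) (hn : n < 7) :
    PySem.List.pyGetD
        (dados.foldl (fun p dado => PySem.List.pySetD p dado 1) ([0, 0, 0, 0, 0, 0, 0] : List Int))
        ((n : Nat) : Int) 0 =
      if ∃ d ∈ dados, d % 7 = ((n : Nat) : Int) then 1 else 0 := by
  rw [PySem.List.pyGetD_natCast,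
      build_getD dados ([0, 0, 0, 0, 0, 0, 0] : List Int) (by simp) hpre n hn]
  interval_cases n <;> simp [List.getD]

-- ===== VERDICT (by name: the statement is the Claim_ definition above) =====
set_option maxHeartbeats 1000000 in
theorem calcula_pontos_sequencia_alta_spec : Claim_equal_calcula_pontos_sequencia_alta := by
  intro dados _ hpre
  unfold Spec_calcula_pontos_sequencia_alta
  have hpre' : ∀ d ∈ dados, -7 ≤ d ∧ d < 7 := hpre
  simp only [calcula_pontos_sequencia_alta, calcula_pontos_sequencia_alta_alt]
  have h1 := hgetL dados hpre' 1 (by norm_num); have h2 := hgetL dados hpre' 2 (by norm_num)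
  have h3 := hgetL dados hpre' 3 (by norm_num); have h4 := hgetL dados hpre' 4 (by norm_num)
  have h5 := hgetL dados hpre' 5 (by norm_num); have h6 := hgetL dados hpre' 6 (by norm_num)
  norm_num at h1 h2 h3 h4 h5 h6
  have hrange : PySem.List.pyRange 1 7 1 = [1, 2, 3, 4, 5, 6] := by decide
  rw [hrange]
  simp only [List.foldl_cons, List.foldl_nil, List.replicate, List.all_cons, List.all_nil,
    h1, h2, h3, h4, h5, h6]
  by_cases c1 : ∃ d ∈ dados, d % 7 = 1 <;>
  by_cases c2 : ∃ d ∈ dados, d % 7 = 2 <;>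
  by_cases c3 : ∃ d ∈ dados, d % 7 = 3 <;>
  by_cases c4 : ∃ d ∈ dados, d % 7 = 4 <;>
  by_cases c5 : ∃ d ∈ dados, d % 7 = 5 <;>
  by_cases c6 : ∃ d ∈ dados, d % 7 = 6 <;>
  simp [c1, c2, c3, c4, c5, c6]
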